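-- pv_equiv track=rewrite | github.com/ashghost1027/ZBreaker | Todaysproblem.py | maximize_score
-- ===== SOURCE A (Python) =====
-- def maximize_score(array):
--     scores = []
--
--     K = 0
--     for _ in range(len(array)):
--         score = 0
--         bucket = []
--         for j in range(K):
--             bucket.append(array[j])
--         for j in range(K,len(array)):
--             bucket.append(array[j])
--             score += bucket.pop(bucket.index(max(bucket)))
--         scores.append(score)
--         K+=1
--
--
--     return scores
-- ===== SOURCE B (Python) =====
-- def maximize_score(array):
--     # scores[K] = sum(array) - sum of the K smallest elements:
--     # the inner process keeps the K smallest elements seen so far and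
--     # pays out everything else, so sort once and use prefix sums.
--     total = sum(array)
--     scores = []
--     prefix = 0
--     for x in sorted(array):
--         scores.append(total - prefix)
--         prefix += x
--     return scores
-- ===== Notes on version B (the rewrite author's own statement) =====
-- stated objective: faster
-- what changed: A's inner remove-the-max loop maintains exactly the K smallest elements seen so far, so scores[K] = sum(array) - sum of the K smallest elements; B sorts once and emits total minus prefix sums, replacing A's O(n^3) triple scan.
import Mathlib
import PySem

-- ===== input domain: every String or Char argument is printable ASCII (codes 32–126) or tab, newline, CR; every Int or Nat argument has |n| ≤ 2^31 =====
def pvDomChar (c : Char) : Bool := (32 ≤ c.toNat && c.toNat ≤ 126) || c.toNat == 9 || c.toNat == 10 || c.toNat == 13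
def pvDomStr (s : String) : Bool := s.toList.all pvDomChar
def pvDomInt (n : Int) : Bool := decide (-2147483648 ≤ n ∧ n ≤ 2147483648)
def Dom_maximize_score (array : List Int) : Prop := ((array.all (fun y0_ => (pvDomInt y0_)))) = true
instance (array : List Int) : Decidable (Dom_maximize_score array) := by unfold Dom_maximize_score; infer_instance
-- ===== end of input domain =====

-- B replaces A's cubic remove-the-max simulation by one sort plus prefix sums
-- (scores[K] = total - sum of the K smallest elements); equivalence proved below.

-- ===== PORT A =====
-- one iteration of A's inner loop body: bucket.append(x); score += bucket.pop(bucket.index(max(bucket)))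
def pvMaxStep (st : List Int × Int) (x : Int) : List Int × Int :=
  let bucket := st.1 ++ [x]
  match PySem.List.max? bucket (fun y => y) with
  | none => (bucket, st.2)
  | some m =>
    match PySem.List.index? bucket m with
    | none => (bucket, st.2)
    | some i =>
      match PySem.List.pop? bucket (i : Int) with
      | none => (bucket, st.2)
      | some pr => (pr.2, st.2 + pr.1)

-- the body of A's outer iteration for a given K: build bucket, run the inner loop, return score
def pvInner (array : List Int) (K : Int) : Int :=
  let bucket0 := (PySem.List.pyRange 0 K 1).foldl
      (fun b j => b ++ [PySem.List.pyGetD array j 0]) ([] : List Int)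
  ((PySem.List.pyRange K (array.length : Int) 1).foldl
      (fun st j => pvMaxStep st (PySem.List.pyGetD array j 0)) (bucket0, 0)).2

def maximize_score (array : List Int) : List Int :=
  ((List.range array.length).foldl
    (fun (st : List Int × Int) _ => (st.1 ++ [pvInner array st.2], st.2 + 1))
    ([], 0)).1

-- ===== PORT B =====
def maximize_score_alt (array : List Int) : List Int :=
  let total := array.sum
  ((PySem.List.sorted array (fun x => x) false).foldl
    (fun (st : List Int × Int) x => (st.1 ++ [total - st.2], st.2 + x))
    ([], 0)).1

-- ===== PRECONDITION & SPEC =====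
def Spec_maximize_score (array : List Int) (out : List Int) : Prop := out = maximize_score_alt array
instance (array : List Int) (out : List Int) : Decidable (Spec_maximize_score array out) := by unfold Spec_maximize_score; infer_instance

-- ===== CLAIM (what is proved, stated in full; the proofs are below) =====
def Claim_equal_maximize_score : Prop := ∀ (array : List Int), Dom_maximize_score array → Spec_maximize_score array (maximize_score array)

-- ===== LEMMAS AND PROOFS =====

-- abstract step on a sorted bucket: insert in order, drop the (maximal) last element
def pvG (t : List Int) (x : Int) : List Int :=
  (List.orderedInsert (· ≤ ·) x t).dropLast

lemma le_getLast_of_pairwise (l : List Int) (h : l.Pairwise (· ≤ ·)) (a : Int) (ha : a ∈ l) (hn : l ≠ []) :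
    a ≤ l.getLast hn := by
  rw [← List.dropLast_concat_getLast hn] at h ha
  rcases List.mem_append.1 ha with hd | hl
  · exact (List.pairwise_append.1 h).2.2 a hd (l.getLast hn) (by simp)
  · simp at hl; omega

lemma pvMaxStep_spec (b t : List Int) (s x : Int) (hp : b.Perm t) (hs : t.Pairwise (· ≤ ·)) :
    (pvMaxStep (b, s) x).1.Perm (pvG t x) ∧
    (pvMaxStep (b, s) x).2 = s + (x + t.sum - (pvG t x).sum) := by
  set u := List.orderedInsert (· ≤ ·) x t with hu
  have hus : u.Pairwise (· ≤ ·) := List.Pairwise.orderedInsert x t hs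
  have hperm_u : u.Perm (b ++ [x]) :=
    (List.perm_orderedInsert _ x t).trans (((hp.symm).cons x).trans (List.perm_append_singleton x b).symm).symm.symm
  have hune : u ≠ [] := by
    intro h; have := hperm_u.length_eq; simp [h] at this
  have hdec : pvG t x ++ [u.getLast hune] = u := List.dropLast_concat_getLast hune
  set m := u.getLast hune with hm
  have hmu : m ∈ u := List.getLast_mem hune
  have hmb : m ∈ b ++ [x] := hperm_u.mem_iff.1 hmu
  -- max? returns some value, which must equal m
  obtain ⟨m', hm'⟩ : ∃ m', PySem.List.max? (b ++ [x]) (fun y => y) = some m' := by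
    cases h : PySem.List.max? (b ++ [x]) (fun y => y) with
    | none => exact absurd ((PySem.List.max?_eq_none_iff _ _).1 h) (by simp)
    | some v => exact ⟨v, rfl⟩
  have hm'm : m' = m := by
    have h1 : m' ≤ m := le_getLast_of_pairwise u hus m' (hperm_u.mem_iff.2 (PySem.List.max?_mem hm')) hune
    have h2 : m ≤ m' := PySem.List.max?_isMax hm' m hmb
    omega
  rw [hm'm] at hm'; clear hm'm
  -- index? finds m
  obtain ⟨i, hi⟩ : ∃ i, PySem.List.index? (b ++ [x]) m = some i :=
    Option.isSome_iff_exists.1 ((PySem.List.index?_isSome_iff _ _).2 hmb)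
  obtain ⟨hik, hgi, -⟩ := PySem.List.getElem_of_index?_eq_some hi
  have hpop := PySem.List.pop?_natCast (b ++ [x]) i hik
  simp only [pvMaxStep, hm', hi, hpop]
  have hperm2 : (b ++ [x]).Perm (m :: (b ++ [x]).eraseIdx i) := by
    have := List.getElem_cons_eraseIdx_perm hik
    rw [hgi] at this
    exact this.symm
  have hcons : (m :: pvG t x).Perm (m :: (b ++ [x]).eraseIdx i) :=
    ((List.perm_append_singleton _ _).symm.trans
      (hdec ▸ (hperm_u.trans hperm2) : (pvG t x ++ [m]).Perm (m :: (b ++ [x]).eraseIdx i)))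
  have hperm_res : ((b ++ [x]).eraseIdx i).Perm (pvG t x) := (hcons.cons_inv).symm
  have hsum_u : u.sum = x + t.sum := by
    have := hperm_u.sum_eq
    have h2 : (x :: b).sum = x + b.sum := by simp
    have h3 : b.sum = t.sum := hp.sum_eq
    simp at this
    omega
  have hsum_dec : (pvG t x).sum + m = u.sum := by
    rw [← hdec]; simp
  constructor
  · exact hperm_res
  · rw [hgi]; omega

lemma pvG_sorted {t : List Int} (hs : t.Pairwise (· ≤ ·)) (x : Int) :
    (pvG t x).Pairwise (· ≤ ·) :=
  List.Pairwise.sublist (List.dropLast_sublist _) (List.Pairwise.orderedInsert x t hs)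

lemma pvFold_maxStep (xs : List Int) : ∀ (b t : List Int) (s : Int),
    b.Perm t → t.Pairwise (· ≤ ·) →
    (xs.foldl pvMaxStep (b, s)).1.Perm (xs.foldl pvG t) ∧
    (xs.foldl pvMaxStep (b, s)).2 = s + (t.sum + xs.sum) - (xs.foldl pvG t).sum := by
  induction xs with
  | nil =>
    intro b t s hp _
    refine ⟨by simpa using hp, ?_⟩
    simp
  | cons x xs ih =>
    intro b t s hp hs
    obtain ⟨h1, h2⟩ := pvMaxStep_spec b t s x hp hs
    have hs' : (pvG t x).Pairwise (· ≤ ·) := pvG_sorted hs x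
    have hih := ih (pvMaxStep (b, s) x).1 (pvG t x) (pvMaxStep (b, s) x).2 h1 hs'
    simp only [List.foldl_cons] at hih ⊢
    constructor
    · exact hih.1
    · rw [hih.2, h2]; simp [List.sum_cons]; omega

lemma pvOrderedInsert_take (t : List Int) : ∀ (K : ℕ) (x : Int), K ≤ t.length →
    (List.orderedInsert (· ≤ ·) x (t.take K)).dropLast =
      (List.orderedInsert (· ≤ ·) x t).take K := by
  induction t with
  | nil => intro K x hK; simp at hK; simp [hK, List.orderedInsert]
  | cons a t ih =>
    intro K x hK
    cases K with
    | zero => simp [List.orderedInsert]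
    | succ K' =>
      have hK' : K' ≤ t.length := by simpa using hK
      simp only [List.take_succ_cons, List.orderedInsert]
      by_cases hxa : x ≤ a
      · simp only [if_pos hxa, List.dropLast_eq_take]
        have hlen : (x :: a :: t.take K').length - 1 = K' + 1 := by
          simp [List.length_take]; omega
        rw [hlen]
        simp only [List.take_succ_cons]
        cases K' with
        | zero => simp
        | succ K'' => simp [List.take_succ_cons, List.take_take]
      · simp only [if_neg hxa]
        rw [List.dropLast_cons_of_ne_nil (by
          intro h
          have := congrArg List.length h
          rw [List.orderedInsert_length] at this
          simp at this), ih K' x hK', List.take_succ_cons]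

lemma pvSort_append (p : List Int) (x : Int) :
    List.insertionSort (· ≤ ·) (p ++ [x]) =
      List.orderedInsert (· ≤ ·) x (List.insertionSort (· ≤ ·) p) := by
  apply List.Perm.eq_of_pairwise (fun a b _ _ h1 h2 => le_antisymm h1 h2)
  · exact List.pairwise_insertionSort _ _
  · exact List.Pairwise.orderedInsert x _ (List.pairwise_insertionSort _ _)
  · exact (List.perm_insertionSort _ _).trans ((List.perm_append_singleton x p).trans
      (((List.perm_insertionSort (· ≤ ·) p).symm.cons x).trans
        (List.perm_orderedInsert _ x _).symm))

lemma pvFold_g (q : List Int) : ∀ (p : List Int) (K : ℕ), K ≤ p.length →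
    q.foldl pvG ((List.insertionSort (· ≤ ·) p).take K) =
      (List.insertionSort (· ≤ ·) (p ++ q)).take K := by
  induction q with
  | nil => intro p K _; simp
  | cons x q ih =>
    intro p K hK
    have hKs : K ≤ (List.insertionSort (· ≤ ·) p).length := by
      rwa [List.length_insertionSort]
    have hstep : pvG ((List.insertionSort (· ≤ ·) p).take K) x =
        (List.insertionSort (· ≤ ·) (p ++ [x])).take K := by
      rw [pvG, pvOrderedInsert_take _ K x hKs, pvSort_append]
    have := ih (p ++ [x]) K (by simp; omega)
    simp only [List.foldl_cons, hstep, this, List.append_assoc, List.singleton_append]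

lemma pvTake_map_range (xs : List Int) (K : ℕ) (h : K ≤ xs.length) :
    (List.range K).map (fun k => xs.getD k 0) = xs.take K := by
  apply List.ext_getElem
  · simp; omega
  · intro i h1 h2
    have hi : i < K := by simpa using h1
    have hix : i < xs.length := by omega
    simp [List.getElem_take, List.getD_eq_getElem?_getD, List.getElem?_eq_getElem hix]

lemma pvSorted_eq (array : List Int) :
    PySem.List.sorted array (fun x => x) false = List.insertionSort (· ≤ ·) array :=
  PySem.List.sorted_id_eq_of_perm_of_pairwise array (List.insertionSort (· ≤ ·) array)
    (List.perm_insertionSort _ _) (List.pairwise_insertionSort _ _)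

lemma pvInner_eq (array : List Int) (K : ℕ) (h : K ≤ array.length) :
    pvInner array (K : Int) =
      array.sum - ((List.insertionSort (· ≤ ·) array).take K).sum := by
  unfold pvInner
  have hb0 : (PySem.List.pyRange 0 (K : Int) 1).foldl
      (fun b j => b ++ [PySem.List.pyGetD array j 0]) ([] : List Int) = array.take K := by
    rw [PySem.List.foldl_append_singleton_eq_map, PySem.List.pyRange_one, List.map_map]
    have h0 : ((K : Int) - 0).toNat = K := by omega
    rw [h0, ← pvTake_map_range array K h]
    apply List.map_congr_left
    intro k _
    simp [PySem.List.pyGetD_natCast]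
  rw [hb0]
  show (List.foldl (fun st j => pvMaxStep st (PySem.List.pyGetD array j 0))
      (array.take K, 0) (PySem.List.pyRange (K : Int) (array.length : Int) 1)).2 = _
  rw [PySem.List.foldl_pyRange_pyGetD' array 0 pvMaxStep (array.take K, 0) (by positivity)]
  have hfold := pvFold_maxStep (array.drop ((K:Int)).toNat) (array.take K)
      (List.insertionSort (· ≤ ·) (array.take K)) 0
      (List.perm_insertionSort _ _).symm (List.pairwise_insertionSort _ _)
  rw [hfold.2]
  have htoNat : ((K : Int)).toNat = K := by omega
  rw [htoNat] at *
  have hself : (List.insertionSort (· ≤ ·) (array.take K)).take K =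
      List.insertionSort (· ≤ ·) (array.take K) := by
    apply List.take_of_length_le
    rw [List.length_insertionSort, List.length_take]
    omega
  have hfg := pvFold_g (array.drop K) (array.take K) K (by rw [List.length_take]; omega)
  rw [hself] at hfg
  rw [hfg, List.take_append_drop]
  have hsum1 : (List.insertionSort (· ≤ ·) (array.take K)).sum = (array.take K).sum :=
    (List.perm_insertionSort _ _).sum_eq
  have hsum2 : (array.take K).sum + (array.drop K).sum = array.sum :=
    List.sum_take_add_sum_drop array K
  omega

lemma pvOuter_fold (array : List Int) (m : ℕ) : ∀ (s0 : List Int) (K0 : Int),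
    ((List.range m).foldl
      (fun (st : List Int × Int) _ => (st.1 ++ [pvInner array st.2], st.2 + 1)) (s0, K0)) =
    (s0 ++ (List.range m).map (fun (i : ℕ) => pvInner array (K0 + (i : Int))), K0 + (m : Int)) := by
  induction m with
  | zero => intro s0 K0; simp
  | succ m ih =>
    intro s0 K0
    rw [List.range_succ, List.foldl_append, ih s0 K0, List.map_append, List.foldl_cons,
      List.foldl_nil]
    refine Prod.ext ?_ ?_
    · simp
    · push_cast; ring

lemma pvAlt_fold (l : List Int) : ∀ (out : List Int) (pre total : Int),
    ((l.foldl (fun (st : List Int × Int) x => (st.1 ++ [total - st.2], st.2 + x)) (out, pre))).1 =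
      out ++ (List.range l.length).map (fun K => total - (pre + (l.take K).sum)) := by
  induction l with
  | nil => intro out pre total; simp
  | cons x l ih =>
    intro out pre total
    rw [List.foldl_cons, ih (out ++ [total - pre]) (pre + x) total]
    rw [List.length_cons, List.range_succ_eq_map, List.map_cons, List.map_map]
    simp only [List.take_zero, List.sum_nil, List.append_assoc, List.singleton_append]
    congr 2
    · omega
    · apply List.map_congr_left
      intro K _
      simp [List.take_succ_cons]
      ring

-- ===== VERDICT (by name: the statement is the Claim_ definition above) =====
theorem maximize_score_spec : Claim_equal_maximize_score := by
  intro array _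
  unfold Spec_maximize_score maximize_score maximize_score_alt
  rw [pvOuter_fold array array.length [] 0, pvSorted_eq, pvAlt_fold]
  have hlen : (List.insertionSort (· ≤ ·) array).length = array.length :=
    List.length_insertionSort ..
  rw [hlen]
  simp only [List.nil_append]
  apply List.map_congr_left
  intro i hi
  have : i < array.length := List.mem_range.1 hi
  rw [show (0 : Int) + (i : Int) = (i : Int) by ring, pvInner_eq array i (le_of_lt this)]
  ring_nf
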